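-- pv_equiv track=rewrite | github.com/LANNDS18/Vision_SIFT | utilities_algorithms.py | divide_into_correct_and_incorrect
-- ===== SOURCE A (Python) =====
-- def divide_into_correct_and_incorrect(key, test, predict_y):
--     correct = {}
--     incorrect = {}
--     for i in range(len(key)):
--         class_correct = []
--         class_incorrect = []
--         for j in range(len(predict_y)):
--             if predict_y[j] == key[i] or test[j] == key[i]:
--                 if test[j] == predict_y[j]:
--                     class_correct.append(j)
--                 else:
--                     if test[j] == key[i]:
--                         class_incorrect.append(j)
--         correct[key[i]] = class_correct
--         incorrect[key[i]] = class_incorrect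
--     return correct, incorrect
-- ===== SOURCE B (Python) =====
-- def divide_into_correct_and_incorrect(key, test, predict_y):
--     # One pass: bucket each index under its test label instead of rescanning
--     # all predictions for every key.
--     correct = {k: [] for k in key}
--     incorrect = {k: [] for k in key}
--     for j, (t, p) in enumerate(zip(test, predict_y)):
--         if t == p:
--             if t in correct:
--                 correct[t].append(j)
--         elif t in incorrect:
--             incorrect[t].append(j)
--     return correct, incorrect
-- ===== Notes on version B (the rewrite author's own statement) =====
-- stated objective: faster
-- what changed: A rescans the whole prediction list once per key (nested loops); B seeds one empty bucket per key and makes a single pass over zip(test, predict_y), appending each index to its label's correct/incorrect bucket.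
import Mathlib
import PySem

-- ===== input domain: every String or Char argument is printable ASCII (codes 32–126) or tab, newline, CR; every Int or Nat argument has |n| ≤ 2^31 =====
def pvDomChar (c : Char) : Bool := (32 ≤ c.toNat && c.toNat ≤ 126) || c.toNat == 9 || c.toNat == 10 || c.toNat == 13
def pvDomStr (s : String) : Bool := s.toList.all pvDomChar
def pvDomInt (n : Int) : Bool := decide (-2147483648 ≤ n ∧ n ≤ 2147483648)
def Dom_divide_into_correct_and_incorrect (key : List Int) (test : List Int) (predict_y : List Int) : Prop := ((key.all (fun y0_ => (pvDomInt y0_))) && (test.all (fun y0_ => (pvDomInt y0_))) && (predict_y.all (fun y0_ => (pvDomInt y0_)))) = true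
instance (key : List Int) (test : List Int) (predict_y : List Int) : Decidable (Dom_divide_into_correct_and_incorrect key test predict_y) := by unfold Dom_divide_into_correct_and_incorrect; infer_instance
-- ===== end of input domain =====

-- B replaces A's per-key rescan of all predictions with one seeding pass over key
-- plus one bucketing pass over zip(test, predict_y) (objective: faster, one pass).

-- ===== PORT A =====
-- A-side helper: A's inner loop (for j in range(len(predict_y))) run for one key k
def pvInnerA (test : List Int) (predict_y : List Int) (k : Int) : List Int × List Int :=
  (PySem.List.pyRange 0 (PySem.List.len predict_y) 1).foldl
    (fun (p : List Int × List Int) j =>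
      if PySem.List.pyGetD predict_y j 0 == k || PySem.List.pyGetD test j 0 == k then
        if PySem.List.pyGetD test j 0 == PySem.List.pyGetD predict_y j 0 then (p.1 ++ [j], p.2)
        else if PySem.List.pyGetD test j 0 == k then (p.1, p.2 ++ [j])
        else p
      else p) ([], [])

def divide_into_correct_and_incorrect (key : List Int) (test : List Int) (predict_y : List Int) : (List (Int × List Int)) × (List (Int × List Int)) :=
  let res := (PySem.List.pyRange 0 (PySem.List.len key) 1).foldl
    (fun (st : PySem.Dict Int (List Int) × PySem.Dict Int (List Int)) i =>
      (st.1.insert (PySem.List.pyGetD key i 0) (pvInnerA test predict_y (PySem.List.pyGetD key i 0)).1,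
       st.2.insert (PySem.List.pyGetD key i 0) (pvInnerA test predict_y (PySem.List.pyGetD key i 0)).2))
    (PySem.Dict.empty, PySem.Dict.empty)
  (res.1.items, res.2.items)

-- ===== PORT B =====
def divide_into_correct_and_incorrect_alt (key : List Int) (test : List Int) (predict_y : List Int) : (List (Int × List Int)) × (List (Int × List Int)) :=
  let correct0 : PySem.Dict Int (List Int) := key.foldl (fun d k => d.insert k []) PySem.Dict.empty
  let incorrect0 : PySem.Dict Int (List Int) := key.foldl (fun d k => d.insert k []) PySem.Dict.empty
  let st := (PySem.List.enumerate (test.zip predict_y)).foldl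
    (fun (st : PySem.Dict Int (List Int) × PySem.Dict Int (List Int)) e =>
      if e.2.1 == e.2.2 then
        (if st.1.contains e.2.1 then st.1.modify e.2.1 [] (· ++ [e.1]) else st.1, st.2)
      else
        (st.1, if st.2.contains e.2.1 then st.2.modify e.2.1 [] (· ++ [e.1]) else st.2))
    (correct0, incorrect0)
  (st.1.items, st.2.items)

-- ===== PRECONDITION & SPEC =====
-- A raises IndexError (test[j] for j ≥ len(test)) as soon as key is nonempty and
-- predict_y is longer than test; those inputs are excluded.
def Pre_divide_into_correct_and_incorrect (key : List Int) (test : List Int) (predict_y : List Int) : Prop :=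
  key = [] ∨ predict_y.length ≤ test.length
instance (key : List Int) (test : List Int) (predict_y : List Int) : Decidable (Pre_divide_into_correct_and_incorrect key test predict_y) := by unfold Pre_divide_into_correct_and_incorrect; infer_instance

def pvWitness_divide_into_correct_and_incorrect : List Int × List Int × List Int := ([1, 2], [1, 2, 1], [1, 1, 2])

def Spec_divide_into_correct_and_incorrect (key : List Int) (test : List Int) (predict_y : List Int) (out : (List (Int × List Int)) × (List (Int × List Int))) : Prop := out = divide_into_correct_and_incorrect_alt key test predict_y
instance (key : List Int) (test : List Int) (predict_y : List Int) (out : (List (Int × List Int)) × (List (Int × List Int))) : Decidable (Spec_divide_into_correct_and_incorrect key test predict_y out) := by unfold Spec_divide_into_correct_and_incorrect; infer_instance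

-- ===== CLAIM (what is proved, stated in full; the proofs are below) =====
def Claim_equal_divide_into_correct_and_incorrect : Prop := ∀ (key : List Int) (test : List Int) (predict_y : List Int), Dom_divide_into_correct_and_incorrect key test predict_y → Pre_divide_into_correct_and_incorrect key test predict_y → Spec_divide_into_correct_and_incorrect key test predict_y (divide_into_correct_and_incorrect key test predict_y)

-- ===== LEMMAS AND PROOFS =====

-- B's one-step updates on each dict, as standalone functions
def pvGC (d : PySem.Dict Int (List Int)) (e : Int × Int × Int) : PySem.Dict Int (List Int) :=
  if e.2.1 == e.2.2 then (if d.contains e.2.1 then d.modify e.2.1 [] (· ++ [e.1]) else d) else d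
def pvGI (d : PySem.Dict Int (List Int)) (e : Int × Int × Int) : PySem.Dict Int (List Int) :=
  if e.2.1 == e.2.2 then d else (if d.contains e.2.1 then d.modify e.2.1 [] (· ++ [e.1]) else d)

-- the two filter predicates of A's inner loop
def pvBC (test : List Int) (predict_y : List Int) (k : Int) (j : Int) : Bool :=
  (PySem.List.pyGetD predict_y j 0 == k || PySem.List.pyGetD test j 0 == k) &&
    (PySem.List.pyGetD test j 0 == PySem.List.pyGetD predict_y j 0)
def pvBI (test : List Int) (predict_y : List Int) (k : Int) (j : Int) : Bool :=
  (PySem.List.pyGetD predict_y j 0 == k || PySem.List.pyGetD test j 0 == k) &&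
    !(PySem.List.pyGetD test j 0 == PySem.List.pyGetD predict_y j 0) && (PySem.List.pyGetD test j 0 == k)

lemma pvInnerA_eq (test predict_y : List Int) (k : Int) :
    pvInnerA test predict_y k =
      ((PySem.List.pyRange 0 (PySem.List.len predict_y) 1).filter (pvBC test predict_y k),
       (PySem.List.pyRange 0 (PySem.List.len predict_y) 1).filter (pvBI test predict_y k)) := by
  unfold pvInnerA
  have hfun : (fun (p : List Int × List Int) (j : Int) =>
      if PySem.List.pyGetD predict_y j 0 == k || PySem.List.pyGetD test j 0 == k then
        if PySem.List.pyGetD test j 0 == PySem.List.pyGetD predict_y j 0 then (p.1 ++ [j], p.2)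
        else if PySem.List.pyGetD test j 0 == k then (p.1, p.2 ++ [j])
        else p
      else p)
      = (fun (p : List Int × List Int) (j : Int) =>
        (if pvBC test predict_y k j then p.1 ++ [j] else p.1,
         if pvBI test predict_y k j then p.2 ++ [j] else p.2)) := by
    funext p j
    simp only [pvBC, pvBI]
    by_cases h1 : (PySem.List.pyGetD predict_y j 0 == k) = true <;>
      by_cases h2 : (PySem.List.pyGetD test j 0 == PySem.List.pyGetD predict_y j 0) = true <;>
        by_cases h3 : (PySem.List.pyGetD test j 0 == k) = true <;>
          simp [h1, h2, h3]
  rw [hfun, PySem.List.foldl_prod_mk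
      (fun (a : List Int) (j : Int) => if pvBC test predict_y k j then a ++ [j] else a)
      (fun (a : List Int) (j : Int) => if pvBI test predict_y k j then a ++ [j] else a),
    PySem.List.foldl_append_if_eq_filter, PySem.List.foldl_append_if_eq_filter]
  simp

-- a fold of inserts whose value depends only on the key
lemma pvGetD_foldl_insert_fun (v : Int → List Int) (l : List Int) (d : PySem.Dict Int (List Int))
    (c : Int) (d0 : List Int) :
    (l.foldl (fun d k => d.insert k (v k)) d).getD c d0 = if c ∈ l then v c else d.getD c d0 := by
  induction l generalizing d with
  | nil => simp
  | cons k l ih =>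
    simp only [List.foldl_cons, ih, PySem.Dict.getD_insert, List.mem_cons]
    by_cases h1 : c ∈ l <;> by_cases h2 : c = k <;> simp [h1, h2]

lemma pvItems_foldl_insert_fun (v : Int → List Int) (key : List Int) :
    ((key.foldl (fun d k => d.insert k (v k)) PySem.Dict.empty)).items
      = (PySem.Set.ofList key).map (fun k => (k, v k)) := by
  have hk : ((key.foldl (fun d k => d.insert k (v k)) PySem.Dict.empty)).keys
      = PySem.Set.ofList key := by
    rw [PySem.Dict.keys_foldl_insert key (fun _ k => v k)]
    simp [pysem]
  have hn := PySem.Dict.nodup_keys_foldl_insert key (fun _ k => v k) PySem.Dict.empty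
    PySem.Dict.nodup_keys_empty
  rw [PySem.Dict.items_eq_map_keys _ hn [], hk]
  apply List.map_congr_left
  intro k hkm
  have hmem : k ∈ key := (PySem.Set.mem_ofList key k).1 hkm
  rw [pvGetD_foldl_insert_fun]
  simp [hmem]

-- one step of pvGC/pvGI never changes the key set
lemma pvKeys_pvGC (d : PySem.Dict Int (List Int)) (e : Int × Int × Int) : (pvGC d e).keys = d.keys := by
  unfold pvGC
  by_cases h1 : (e.2.1 == e.2.2) = true
  · by_cases h2 : d.contains e.2.1 = true
    · simp [h1, h2, PySem.Dict.keys_modify, PySem.Dict.keys_insert_of_contains _ _ h2]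
    · simp [h1, h2]
  · simp [h1]
lemma pvKeys_pvGI (d : PySem.Dict Int (List Int)) (e : Int × Int × Int) : (pvGI d e).keys = d.keys := by
  unfold pvGI
  by_cases h1 : (e.2.1 == e.2.2) = true
  · simp [h1]
  · by_cases h2 : d.contains e.2.1 = true
    · simp [h1, h2, PySem.Dict.keys_modify, PySem.Dict.keys_insert_of_contains _ _ h2]
    · simp [h1, h2]

lemma pvKeys_foldl_pvGC (l : List (Int × Int × Int)) (d : PySem.Dict Int (List Int)) :
    (l.foldl pvGC d).keys = d.keys := by
  induction l generalizing d with
  | nil => rfl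
  | cons e l ih => simp [List.foldl_cons, ih, pvKeys_pvGC]
lemma pvKeys_foldl_pvGI (l : List (Int × Int × Int)) (d : PySem.Dict Int (List Int)) :
    (l.foldl pvGI d).keys = d.keys := by
  induction l generalizing d with
  | nil => rfl
  | cons e l ih => simp [List.foldl_cons, ih, pvKeys_pvGI]

lemma pvContains_pvGC (d : PySem.Dict Int (List Int)) (e : Int × Int × Int) (c : Int) :
    (pvGC d e).contains c = d.contains c := by
  rw [PySem.Dict.contains_eq_decide_mem_keys, PySem.Dict.contains_eq_decide_mem_keys, pvKeys_pvGC]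
lemma pvContains_pvGI (d : PySem.Dict Int (List Int)) (e : Int × Int × Int) (c : Int) :
    (pvGI d e).contains c = d.contains c := by
  rw [PySem.Dict.contains_eq_decide_mem_keys, PySem.Dict.contains_eq_decide_mem_keys, pvKeys_pvGI]

lemma pvGetD_foldl_pvGC (l : List (Int × Int × Int)) (d : PySem.Dict Int (List Int)) (c : Int)
    (hc : d.contains c = true) :
    (l.foldl pvGC d).getD c []
      = d.getD c [] ++ (l.filter (fun e => e.2.1 == e.2.2 && e.2.1 == c)).map (·.1) := by
  induction l generalizing d with
  | nil => simp
  | cons e l ih =>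
    rw [List.foldl_cons, ih (pvGC d e) (by rw [pvContains_pvGC]; exact hc)]
    have hstep : (pvGC d e).getD c []
        = d.getD c [] ++ (if (e.2.1 == e.2.2 && e.2.1 == c) = true then [e.1] else []) := by
      unfold pvGC
      by_cases h1 : (e.2.1 == e.2.2) = true
      · by_cases h3 : e.2.1 = c
        · subst h3
          simp [h1, hc]
        · have h2 : d.contains e.2.1 = true ∨ d.contains e.2.1 = false := by
            cases d.contains e.2.1 <;> simp
          rcases h2 with h2 | h2 <;>
            simp [h1, h2, PySem.Dict.getD_modify, h3, Ne.symm h3]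
      · simp [h1]
    rw [hstep]
    by_cases hp : (e.2.1 == e.2.2 && e.2.1 == c) = true <;> simp [hp]

lemma pvGetD_foldl_pvGI (l : List (Int × Int × Int)) (d : PySem.Dict Int (List Int)) (c : Int)
    (hc : d.contains c = true) :
    (l.foldl pvGI d).getD c []
      = d.getD c [] ++ (l.filter (fun e => !(e.2.1 == e.2.2) && e.2.1 == c)).map (·.1) := by
  induction l generalizing d with
  | nil => simp
  | cons e l ih =>
    rw [List.foldl_cons, ih (pvGI d e) (by rw [pvContains_pvGI]; exact hc)]
    have hstep : (pvGI d e).getD c []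
        = d.getD c [] ++ (if (!(e.2.1 == e.2.2) && e.2.1 == c) = true then [e.1] else []) := by
      unfold pvGI
      by_cases h1 : (e.2.1 == e.2.2) = true
      · simp [h1]
      · by_cases h3 : e.2.1 = c
        · subst h3
          simp [h1, hc]
        · have h2 : d.contains e.2.1 = true ∨ d.contains e.2.1 = false := by
            cases d.contains e.2.1 <;> simp
          rcases h2 with h2 | h2 <;>
            simp [h1, h2, PySem.Dict.getD_modify, h3, Ne.symm h3]
    rw [hstep]
    by_cases hp : (!(e.2.1 == e.2.2) && e.2.1 == c) = true <;> simp [hp]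

-- B's dicts, characterised: keys in first-occurrence order, value = filtered indices
lemma pvB_items_C (key : List Int) (E : List (Int × Int × Int)) :
    ((E.foldl pvGC (key.foldl (fun d k => d.insert k []) PySem.Dict.empty))).items
      = (PySem.Set.ofList key).map
          (fun k => (k, (E.filter (fun e => e.2.1 == e.2.2 && e.2.1 == k)).map (·.1))) := by
  have hk0 : ((key.foldl (fun d k => d.insert k ([] : List Int)) PySem.Dict.empty)).keys
      = PySem.Set.ofList key := by
    rw [PySem.Dict.keys_foldl_insert key (fun _ _ => ([] : List Int))]
    simp [pysem]
  have hk : ((E.foldl pvGC (key.foldl (fun d k => d.insert k []) PySem.Dict.empty))).keys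
      = PySem.Set.ofList key := by rw [pvKeys_foldl_pvGC, hk0]
  have hn : ((E.foldl pvGC (key.foldl (fun d k => d.insert k []) PySem.Dict.empty))).keys.Nodup := by
    rw [hk]; exact PySem.Set.nodup_ofList key
  rw [PySem.Dict.items_eq_map_keys _ hn [], hk]
  apply List.map_congr_left
  intro k hkm
  have hmem : k ∈ key := (PySem.Set.mem_ofList key k).1 hkm
  have hc : ((key.foldl (fun d k => d.insert k ([] : List Int)) PySem.Dict.empty)).contains k = true := by
    rw [PySem.Dict.contains_iff_mem_keys, hk0]
    exact hkm
  rw [pvGetD_foldl_pvGC E _ k hc, pvGetD_foldl_insert_fun (fun _ => [])]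
  simp [hmem]

lemma pvB_items_I (key : List Int) (E : List (Int × Int × Int)) :
    ((E.foldl pvGI (key.foldl (fun d k => d.insert k []) PySem.Dict.empty))).items
      = (PySem.Set.ofList key).map
          (fun k => (k, (E.filter (fun e => !(e.2.1 == e.2.2) && e.2.1 == k)).map (·.1))) := by
  have hk0 : ((key.foldl (fun d k => d.insert k ([] : List Int)) PySem.Dict.empty)).keys
      = PySem.Set.ofList key := by
    rw [PySem.Dict.keys_foldl_insert key (fun _ _ => ([] : List Int))]
    simp [pysem]
  have hk : ((E.foldl pvGI (key.foldl (fun d k => d.insert k []) PySem.Dict.empty))).keys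
      = PySem.Set.ofList key := by rw [pvKeys_foldl_pvGI, hk0]
  have hn : ((E.foldl pvGI (key.foldl (fun d k => d.insert k []) PySem.Dict.empty))).keys.Nodup := by
    rw [hk]; exact PySem.Set.nodup_ofList key
  rw [PySem.Dict.items_eq_map_keys _ hn [], hk]
  apply List.map_congr_left
  intro k hkm
  have hmem : k ∈ key := (PySem.Set.mem_ofList key k).1 hkm
  have hc : ((key.foldl (fun d k => d.insert k ([] : List Int)) PySem.Dict.empty)).contains k = true := by
    rw [PySem.Dict.contains_iff_mem_keys, hk0]
    exact hkm
  rw [pvGetD_foldl_pvGI E _ k hc, pvGetD_foldl_insert_fun (fun _ => [])]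
  simp [hmem]

-- the two filtered views of the data coincide when predict_y is no longer than test
lemma pvFilter_eq_C (test predict_y : List Int) (k : Int) (h : predict_y.length ≤ test.length) :
    (PySem.List.pyRange 0 (PySem.List.len predict_y) 1).filter (pvBC test predict_y k)
      = ((PySem.List.enumerate (test.zip predict_y)).filter
          (fun e => e.2.1 == e.2.2 && e.2.1 == k)).map (·.1) := by
  rw [PySem.List.enumerate_eq_map_pyRange (test.zip predict_y) ((0 : Int), (0 : Int)),
    List.filter_map, List.map_map]
  have hlen : PySem.List.len (test.zip predict_y) = PySem.List.len predict_y := by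
    simp [PySem.List.len, List.length_zip]
    omega
  rw [hlen]
  rw [show ((·.1) ∘ (fun j => ((j : Int), PySem.List.pyGetD (test.zip predict_y) j ((0:Int),(0:Int)))))
      = fun (j : Int) => j from rfl, List.map_id_fun']
  apply List.filter_congr
  intro j hj
  obtain ⟨hj0, hj1⟩ := PySem.List.mem_pyRange_one.1 hj
  have hj1' : j < (predict_y.length : Int) := by simpa [PySem.List.len] using hj1
  have hz : PySem.List.pyGetD (test.zip predict_y) j ((0:Int),(0:Int))
      = (PySem.List.pyGetD test j 0, PySem.List.pyGetD predict_y j 0) := by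
    rw [PySem.List.pyGetD_eq_getElem _ _ hj0 (by simp [List.length_zip]; omega),
      List.getElem_zip,
      PySem.List.pyGetD_eq_getElem test 0 hj0 (by omega),
      PySem.List.pyGetD_eq_getElem predict_y 0 hj0 (by omega)]
  simp only [pvBC, Function.comp_apply, hz]
  by_cases h1 : PySem.List.pyGetD test j 0 = PySem.List.pyGetD predict_y j 0
  · simp [h1]
  · have hb : (PySem.List.pyGetD test j 0 == PySem.List.pyGetD predict_y j 0) = false :=
      beq_eq_false_iff_ne.mpr h1
    simp [hb]

lemma pvFilter_eq_I (test predict_y : List Int) (k : Int) (h : predict_y.length ≤ test.length) :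
    (PySem.List.pyRange 0 (PySem.List.len predict_y) 1).filter (pvBI test predict_y k)
      = ((PySem.List.enumerate (test.zip predict_y)).filter
          (fun e => !(e.2.1 == e.2.2) && e.2.1 == k)).map (·.1) := by
  rw [PySem.List.enumerate_eq_map_pyRange (test.zip predict_y) ((0 : Int), (0 : Int)),
    List.filter_map, List.map_map]
  have hlen : PySem.List.len (test.zip predict_y) = PySem.List.len predict_y := by
    simp [PySem.List.len, List.length_zip]
    omega
  rw [hlen]
  rw [show ((·.1) ∘ (fun j => ((j : Int), PySem.List.pyGetD (test.zip predict_y) j ((0:Int),(0:Int)))))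
      = fun (j : Int) => j from rfl, List.map_id_fun']
  apply List.filter_congr
  intro j hj
  obtain ⟨hj0, hj1⟩ := PySem.List.mem_pyRange_one.1 hj
  have hj1' : j < (predict_y.length : Int) := by simpa [PySem.List.len] using hj1
  have hz : PySem.List.pyGetD (test.zip predict_y) j ((0:Int),(0:Int))
      = (PySem.List.pyGetD test j 0, PySem.List.pyGetD predict_y j 0) := by
    rw [PySem.List.pyGetD_eq_getElem _ _ hj0 (by simp [List.length_zip]; omega),
      List.getElem_zip,
      PySem.List.pyGetD_eq_getElem test 0 hj0 (by omega),
      PySem.List.pyGetD_eq_getElem predict_y 0 hj0 (by omega)]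
  simp only [pvBI, Function.comp_apply, hz]
  by_cases h1 : PySem.List.pyGetD test j 0 = PySem.List.pyGetD predict_y j 0
  · simp [h1]
  · have hb : (PySem.List.pyGetD test j 0 == PySem.List.pyGetD predict_y j 0) = false :=
      beq_eq_false_iff_ne.mpr h1
    by_cases h2 : PySem.List.pyGetD test j 0 = k
    · simp [h2]
    · have hb2 : (PySem.List.pyGetD test j 0 == k) = false := beq_eq_false_iff_ne.mpr h2
      simp [hb, hb2]

-- ===== VERDICT (by name: the statement is the Claim_ definition above) =====
theorem divide_into_correct_and_incorrect_spec : Claim_equal_divide_into_correct_and_incorrect := by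
  intro key test predict_y _ hpre
  unfold Spec_divide_into_correct_and_incorrect
  unfold divide_into_correct_and_incorrect divide_into_correct_and_incorrect_alt
  dsimp only
  rw [PySem.List.foldl_prod_mk
    (fun (d : PySem.Dict Int (List Int)) (i : Int) =>
      d.insert (PySem.List.pyGetD key i 0) (pvInnerA test predict_y (PySem.List.pyGetD key i 0)).1)
    (fun (d : PySem.Dict Int (List Int)) (i : Int) =>
      d.insert (PySem.List.pyGetD key i 0) (pvInnerA test predict_y (PySem.List.pyGetD key i 0)).2)]
  rw [PySem.List.foldl_pyRange_zero_pyGetD key 0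
    (fun (d : PySem.Dict Int (List Int)) x => d.insert x (pvInnerA test predict_y x).1)]
  rw [PySem.List.foldl_pyRange_zero_pyGetD key 0
    (fun (d : PySem.Dict Int (List Int)) x => d.insert x (pvInnerA test predict_y x).2)]
  have hBfun : (fun (st : PySem.Dict Int (List Int) × PySem.Dict Int (List Int)) (e : Int × Int × Int) =>
      if e.2.1 == e.2.2 then
        (if st.1.contains e.2.1 then st.1.modify e.2.1 [] (· ++ [e.1]) else st.1, st.2)
      else
        (st.1, if st.2.contains e.2.1 then st.2.modify e.2.1 [] (· ++ [e.1]) else st.2))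
      = fun st e => (pvGC st.1 e, pvGI st.2 e) := by
    funext st e
    unfold pvGC pvGI
    by_cases h1 : (e.2.1 == e.2.2) = true <;> simp [h1]
  rw [hBfun, PySem.List.foldl_prod_mk pvGC pvGI]
  rw [pvItems_foldl_insert_fun (fun k => (pvInnerA test predict_y k).1),
    pvItems_foldl_insert_fun (fun k => (pvInnerA test predict_y k).2)]
  rw [pvB_items_C, pvB_items_I]
  refine Prod.ext ?_ ?_ <;> apply List.map_congr_left <;> intro k hkm
  · have hmem : k ∈ key := (PySem.Set.mem_ofList key k).1 hkm
    have hlen : predict_y.length ≤ test.length := by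
      rcases hpre with h | h
      · subst h; simp at hmem
      · exact h
    rw [pvInnerA_eq]
    simp only
    rw [pvFilter_eq_C test predict_y k hlen]
  · have hmem : k ∈ key := (PySem.Set.mem_ofList key k).1 hkm
    have hlen : predict_y.length ≤ test.length := by
      rcases hpre with h | h
      · subst h; simp at hmem
      · exact h
    rw [pvInnerA_eq]
    simp only
    rw [pvFilter_eq_I test predict_y k hlen]
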